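-- pv_equiv track=rewrite | github.com/drewablo/assessment-tool | backend/api/school_stage2.py | dedupe_year_rows
-- ===== SOURCE A (Python) =====
-- from typing import Dict, List, Optional
--
-- def dedupe_year_rows(rows: List[Dict]) -> List[Dict]:
--     by_year: Dict[int, Dict] = {}
--     ambiguous: List[Dict] = []
--     for row in rows:
--         y = row.get("fiscal_year")
--         if y is None:
--             ambiguous.append(row)
--             continue
--         prev = by_year.get(y)
--         if prev is None or row.get("source_audit_index", -1) >= prev.get("source_audit_index", -1):
--             by_year[y] = row
--     merged = [by_year[y] for y in sorted(by_year.keys())][-3:]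
--     return merged + ambiguous[: max(0, 3 - len(merged))]
-- ===== SOURCE B (Python) =====
-- def dedupe_year_rows(rows):
--     ambiguous = [r for r in rows if r.get("fiscal_year") is None]
--     years = sorted({r["fiscal_year"] for r in rows if r.get("fiscal_year") is not None})
--
--     def best(y):
--         chosen = None
--         for r in rows:
--             if r.get("fiscal_year") == y and (
--                 chosen is None
--                 or chosen.get("source_audit_index", -1) <= r.get("source_audit_index", -1)
--             ):
--                 chosen = r
--         return chosen
--
--     merged = [best(y) for y in years][-3:]
--     return merged + ambiguous[: max(0, 3 - len(merged))]
-- ===== Notes on version B (the rewrite author's own statement) =====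
-- stated objective: alternative
-- what changed: A builds a best-row-per-year dict and an ambiguous list incrementally in one stateful loop; B splits the work into independent declarative pieces: filter the ambiguous rows, sort the distinct years, and for each kept year run a separate scan that picks its winning row (last row attaining the max source_audit_index, default -1).
import Mathlib
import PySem

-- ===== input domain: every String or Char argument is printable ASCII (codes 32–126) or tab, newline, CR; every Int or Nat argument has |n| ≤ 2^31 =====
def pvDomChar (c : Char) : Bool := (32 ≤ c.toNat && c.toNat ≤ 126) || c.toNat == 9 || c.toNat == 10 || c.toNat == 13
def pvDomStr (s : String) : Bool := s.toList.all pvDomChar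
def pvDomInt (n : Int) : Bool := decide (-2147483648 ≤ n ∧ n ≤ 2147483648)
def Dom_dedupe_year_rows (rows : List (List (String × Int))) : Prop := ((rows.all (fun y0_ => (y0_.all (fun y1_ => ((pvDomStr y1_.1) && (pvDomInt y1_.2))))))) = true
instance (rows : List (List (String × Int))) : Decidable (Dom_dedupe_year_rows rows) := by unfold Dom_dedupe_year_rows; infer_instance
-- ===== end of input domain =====

-- B replaces A's incremental best-per-year dict by an up-front split (ambiguous filter, sorted set
-- of years) with an independent per-year scan choosing the winner; objective: alternative.

-- Shared row accessors (a row is a dict str -> int): row.get("fiscal_year"), row.get("source_audit_index", -1)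
def pvRowYear (row : List (String × Int)) : Option Int := (PySem.Dict.mk row).get? "fiscal_year"
def pvRowIdx (row : List (String × Int)) : Int := (PySem.Dict.mk row).getD "source_audit_index" (-1)

-- ===== PORT A =====
-- loop body of A: state = (by_year, ambiguous)
def pvAStep (st : PySem.Dict Int (List (String × Int)) × List (List (String × Int)))
    (row : List (String × Int)) :
    PySem.Dict Int (List (String × Int)) × List (List (String × Int)) :=
  match pvRowYear row with
  | none => (st.1, st.2 ++ [row])
  | some y =>
    match st.1.get? y with
    | none => (st.1.insert y row, st.2)
    | some prev => if pvRowIdx prev ≤ pvRowIdx row then (st.1.insert y row, st.2) else st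

def dedupe_year_rows (rows : List (List (String × Int))) : List (List (String × Int)) :=
  let st := rows.foldl pvAStep (PySem.Dict.empty, [])
  -- by_year[y] cannot raise since y ∈ keys; ported as getD with an unused default
  let merged := PySem.List.slice
    ((PySem.List.sorted st.1.keys (fun x => x) false).map (fun y => st.1.getD y [])) (some (-3)) none
  merged ++ PySem.List.slice st.2 none (some (max 0 (3 - (merged.length : Int))))

-- ===== PORT B =====
-- B's per-year scan: chosen = None; for r in rows: if r.get("fiscal_year") == y and (chosen is None or ...)
def pvBStep (y : Int) (chosen : Option (List (String × Int))) (r : List (String × Int)) :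
    Option (List (String × Int)) :=
  match chosen with
  | none => if pvRowYear r == some y then some r else none
  | some c => if pvRowYear r == some y && decide (pvRowIdx c ≤ pvRowIdx r) then some r else some c

def pvBest (rows : List (List (String × Int))) (y : Int) : Option (List (String × Int)) :=
  rows.foldl (pvBStep y) none

def dedupe_year_rows_alt (rows : List (List (String × Int))) : List (List (String × Int)) :=
  let ambiguous := rows.filter (fun r => (pvRowYear r).isNone)
  let years := PySem.List.sorted (PySem.Set.ofList (rows.filterMap pvRowYear)) (fun x => x) false
  -- best(y) is never None for y ∈ years; ported as getD with an unused default
  let merged := PySem.List.slice (years.map (fun y => (pvBest rows y).getD [])) (some (-3)) none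
  merged ++ PySem.List.slice ambiguous none (some (max 0 (3 - (merged.length : Int))))

-- ===== PRECONDITION & SPEC =====
def Spec_dedupe_year_rows (rows : List (List (String × Int))) (out : List (List (String × Int))) : Prop := out = dedupe_year_rows_alt rows
instance (rows : List (List (String × Int))) (out : List (List (String × Int))) : Decidable (Spec_dedupe_year_rows rows out) := by unfold Spec_dedupe_year_rows; infer_instance

-- ===== CLAIM (what is proved, stated in full; the proofs are below) =====
def Claim_equal_dedupe_year_rows : Prop := ∀ (rows : List (List (String × Int))), Dom_dedupe_year_rows rows → Spec_dedupe_year_rows rows (dedupe_year_rows rows)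

-- ===== LEMMAS AND PROOFS =====

-- A's dict-only loop body
def pvDStep (d : PySem.Dict Int (List (String × Int))) (row : List (String × Int)) :
    PySem.Dict Int (List (String × Int)) :=
  match pvRowYear row with
  | none => d
  | some y =>
    match d.get? y with
    | none => d.insert y row
    | some prev => if pvRowIdx prev ≤ pvRowIdx row then d.insert y row else d

-- L1: A's fold splits into the dict fold and the ambiguous filter
theorem pvA_fold_split (rows : List (List (String × Int)))
    (d : PySem.Dict Int (List (String × Int))) (amb : List (List (String × Int))) :
    rows.foldl pvAStep (d, amb)
      = (rows.foldl pvDStep d, amb ++ rows.filter (fun r => (pvRowYear r).isNone)) := by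
  induction rows generalizing d amb with
  | nil => simp
  | cons r t ih =>
    simp only [List.foldl_cons, List.filter_cons]
    cases hy : pvRowYear r with
    | none =>
      simp [pvAStep, pvDStep, hy, ih]
    | some y =>
      cases hg : d.get? y with
      | none => simp [pvAStep, pvDStep, hy, hg, ih]
      | some prev =>
        by_cases hle : pvRowIdx prev ≤ pvRowIdx r <;>
          simp [pvAStep, pvDStep, hy, hg, hle, ih]

-- L2: lookup in the dict fold is B's per-year scan
theorem pvD_get_eq_best (rows : List (List (String × Int)))
    (d : PySem.Dict Int (List (String × Int))) (y : Int) :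
    (rows.foldl pvDStep d).get? y = rows.foldl (pvBStep y) (d.get? y) := by
  induction rows generalizing d with
  | nil => simp
  | cons r t ih =>
    simp only [List.foldl_cons]
    cases hy : pvRowYear r with
    | none =>
      have hb : pvBStep y (d.get? y) r = d.get? y := by
        cases d.get? y <;> simp [pvBStep, hy]
      rw [hb]
      simp only [pvDStep.eq_def, hy]
      exact ih d
    | some y' =>
      by_cases hyy : y' = y
      · subst hyy
        cases hg : d.get? y' with
        | none =>
          simp only [pvDStep.eq_def, hy, hg, ih]
          simp [pvBStep, hy, PySem.Dict.get?_insert_self]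
        | some prev =>
          by_cases hle : pvRowIdx prev ≤ pvRowIdx r
          · simp only [pvDStep.eq_def, hy, hg, if_pos hle, ih]
            simp [pvBStep, hy, hle, PySem.Dict.get?_insert_self]
          · simp only [pvDStep.eq_def, hy, hg, if_neg hle, ih]
            simp [pvBStep, hy, hle]
      · have hb : pvBStep y (d.get? y) r = d.get? y := by
          cases d.get? y <;> simp [pvBStep, hy, hyy]
        rw [hb]
        cases hg : d.get? y' with
        | none =>
          simp only [pvDStep.eq_def, hy, hg]
          rw [ih, PySem.Dict.get?_insert_of_ne _ _ (fun h => hyy h.symm)]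
        | some prev =>
          simp only [pvDStep.eq_def, hy, hg]
          by_cases hle : pvRowIdx prev ≤ pvRowIdx r
          · rw [if_pos hle, ih, PySem.Dict.get?_insert_of_ne _ _ (fun h => hyy h.symm)]
          · rw [if_neg hle, ih]

-- L3: keys of the dict fold stay nodup
theorem pvD_nodup (rows : List (List (String × Int))) (d : PySem.Dict Int (List (String × Int)))
    (h : d.keys.Nodup) : (rows.foldl pvDStep d).keys.Nodup := by
  induction rows generalizing d with
  | nil => simpa using h
  | cons r t ih =>
    simp only [List.foldl_cons]
    apply ih
    cases hy : pvRowYear r with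
    | none => simpa [pvDStep, hy] using h
    | some y =>
      cases hg : d.get? y with
      | none => simpa [pvDStep, hy, hg] using PySem.Dict.nodup_keys_insert d _ _ h
      | some prev =>
        by_cases hle : pvRowIdx prev ≤ pvRowIdx r
        · simpa [pvDStep, hy, hg, hle] using PySem.Dict.nodup_keys_insert d _ _ h
        · simpa [pvDStep, hy, hg, hle] using h

-- L4: B's scan returns a row iff some row has year y
theorem pvB_isSome (t : List (List (String × Int))) (c : Option (List (String × Int))) (y : Int) :
    (t.foldl (pvBStep y) c).isSome = (c.isSome || t.any (fun r => pvRowYear r == some y)) := by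
  induction t generalizing c with
  | nil => simp
  | cons r t ih =>
    simp only [List.foldl_cons, List.any_cons]
    rw [ih]
    cases c with
    | none => by_cases h : pvRowYear r = some y <;> simp [pvBStep, h]
    | some c =>
      by_cases h : pvRowYear r = some y
      · by_cases hle : pvRowIdx c ≤ pvRowIdx r <;> simp [pvBStep, h, hle]
      · simp [pvBStep, h]

-- L5: the dict-fold's key set is the set of years occurring in rows
theorem pvD_mem_keys (rows : List (List (String × Int))) (y : Int) :
    y ∈ (rows.foldl pvDStep PySem.Dict.empty).keys ↔ y ∈ rows.filterMap pvRowYear := by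
  have h1 : (rows.foldl pvDStep PySem.Dict.empty).get? y = rows.foldl (pvBStep y) none := by
    rw [pvD_get_eq_best]; simp
  have h2 : (rows.foldl (pvBStep y) none).isSome = rows.any (fun r => pvRowYear r == some y) := by
    rw [pvB_isSome]; simp
  simp only [List.mem_filterMap]
  rw [← not_iff_not, ← PySem.Dict.get?_eq_none_iff_not_mem_keys, h1,
    ← Option.not_isSome_iff_eq_none, h2]
  simp [List.any_eq_true]

-- ===== VERDICT (by name: the statement is the Claim_ definition above) =====
theorem dedupe_year_rows_spec : Claim_equal_dedupe_year_rows := by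
  intro rows _
  unfold Spec_dedupe_year_rows dedupe_year_rows dedupe_year_rows_alt
  rw [pvA_fold_split]
  have hnodup : (rows.foldl pvDStep PySem.Dict.empty).keys.Nodup :=
    pvD_nodup rows _ (by simp)
  have hmem : ∀ y, y ∈ (rows.foldl pvDStep PySem.Dict.empty).keys ↔
      y ∈ PySem.Set.ofList (rows.filterMap pvRowYear) := by
    intro y; rw [PySem.Set.mem_ofList]; exact pvD_mem_keys rows y
  have hperm := (List.perm_ext_iff_of_nodup hnodup (PySem.Set.nodup_ofList _)).mpr hmem
  have hsorted := PySem.List.sorted_eq_sorted_of_perm _ _ (fun x => x) (fun _ _ h => h) hperm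
  have hfun : (fun y => (rows.foldl pvDStep PySem.Dict.empty).getD y ([] : List (String × Int)))
      = fun y => (pvBest rows y).getD [] := by
    funext y
    rw [PySem.Dict.getD_eq_get?_getD, pvD_get_eq_best, pvBest]
    simp
  simp only [List.nil_append, hsorted, hfun]
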